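-- pv_equiv track=rewrite | github.com/gkiler/visualization_for_preds | chemical_viz_app/src/ui/components.py | _validate_smiles_basic
-- ===== SOURCE A (Python) =====
-- def _validate_smiles_basic(smiles: str) -> bool:
--     """Basic SMILES validation."""
--     if not smiles or not isinstance(smiles, str):
--         return False
--
--     smiles = smiles.strip()
--     if len(smiles) < 2:
--         return False
--
--     # Basic character check - SMILES should contain valid characters
--     valid_chars = set('ABCDEFGHIJKLMNOPQRSTUVWXYZabcdefghijklmnopqrstuvwxyz0123456789()[]{}=#+-.@/\\')
--     if not all(c in valid_chars for c in smiles):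
--         return False
--
--     # Basic bracket matching
--     brackets = {'(': ')', '[': ']', '{': '}'}
--     stack = []
--     for char in smiles:
--         if char in brackets:
--             stack.append(brackets[char])
--         elif char in brackets.values():
--             if not stack or stack.pop() != char:
--                 return False
--
--     return len(stack) == 0
-- ===== SOURCE B (Python) =====
-- _VALID = set('ABCDEFGHIJKLMNOPQRSTUVWXYZabcdefghijklmnopqrstuvwxyz0123456789()[]{}=#+-.@/\\')
--
--
-- def _drop_pairs(b):
--     """One left-to-right pass deleting disjoint adjacent matched pairs."""
--     out = []
--     i = 0
--     while i < len(b):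
--         if i + 1 < len(b) and b[i] + b[i + 1] in ('()', '[]', '{}'):
--             i += 2
--         else:
--             out.append(b[i])
--             i += 1
--     return out
--
--
-- def _validate_smiles_basic(smiles: str) -> bool:
--     """Basic SMILES validation by iterated elimination of adjacent matched bracket pairs."""
--     if not smiles or not isinstance(smiles, str):
--         return False
--
--     smiles = smiles.strip()
--     if len(smiles) < 2:
--         return False
--
--     brackets = []
--     for c in smiles:
--         if c not in _VALID:
--             return False
--         if c in '()[]{}':
--             brackets.append(c)
--
--     # a bracket sequence is well-matched iff repeatedly removing adjacent
--     # matched pairs reduces it to the empty sequence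
--     while brackets:
--         nxt = _drop_pairs(brackets)
--         if len(nxt) == len(brackets):
--             return False
--         brackets = nxt
--     return True
-- ===== Notes on version B (the rewrite author's own statement) =====
-- stated objective: alternative
-- what changed: B replaces A's explicit bracket stack with a different algorithm: one pass rejects invalid characters and collects the bracket characters, then well-matching is decided by repeatedly deleting adjacent matched open-close bracket pairs until the sequence is empty (valid) or a pass removes nothing (invalid).
import Mathlib
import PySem

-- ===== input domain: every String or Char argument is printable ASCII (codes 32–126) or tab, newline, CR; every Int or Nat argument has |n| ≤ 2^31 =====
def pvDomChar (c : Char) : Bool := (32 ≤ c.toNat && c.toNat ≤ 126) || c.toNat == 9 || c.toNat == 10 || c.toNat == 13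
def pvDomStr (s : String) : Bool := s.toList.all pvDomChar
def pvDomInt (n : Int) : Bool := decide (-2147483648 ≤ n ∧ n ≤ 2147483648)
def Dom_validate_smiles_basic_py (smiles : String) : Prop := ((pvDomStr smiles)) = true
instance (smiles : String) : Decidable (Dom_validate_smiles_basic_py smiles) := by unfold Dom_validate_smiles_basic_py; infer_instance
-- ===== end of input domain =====

-- B decides bracket matching by iterated adjacent-matched-pair elimination on the filtered bracket sequence instead of A's explicit stack; same boolean result.


-- ===== PORT A =====
-- valid_chars = set('ABCDEFGHIJKLMNOPQRSTUVWXYZabcdefghijklmnopqrstuvwxyz0123456789()[]{}=#+-.@/\\')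
def pvValidChars : List Char :=
  "ABCDEFGHIJKLMNOPQRSTUVWXYZabcdefghijklmnopqrstuvwxyz0123456789()[]{}=#+-.@/\\".toList

-- brackets = {'(': ')', '[': ']', '{': '}'} : key test, value lookup and values() test
def pvIsOpener (c : Char) : Bool := c == '(' || c == '[' || c == '{'
def pvCloserOf (c : Char) : Char := if c == '(' then ')' else if c == '[' then ']' else '}'
def pvIsCloser (c : Char) : Bool := c == ')' || c == ']' || c == '}'

-- A's second pass: the bracket-matching for-loop with early return
def pvLoopA (stack : List Char) (cs : List Char) : Bool :=
  match cs with
  | [] => stack.isEmpty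
  | c :: rest =>
    if pvIsOpener c then pvLoopA (pvCloserOf c :: stack) rest
    else if pvIsCloser c then
      match stack with
      | [] => false
      | t :: ts => if t == c then pvLoopA ts rest else false
    else pvLoopA stack rest

def validate_smiles_basic_py (smiles : String) : Bool :=
  if smiles.toList = [] then false
  else
    let cs := PySem.Chars.strip smiles.toList
    if cs.length < 2 then false
    else if cs.all (fun c => pvValidChars.contains c) then pvLoopA [] cs
    else false

-- ===== PORT B =====
-- c in '()[]{}'
def pvIsBracket (c : Char) : Bool :=
  c == '(' || c == ')' || c == '[' || c == ']' || c == '{' || c == '}'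

-- b[i] + b[i+1] in ('()', '[]', '{}')
def pvPair (x y : Char) : Bool :=
  (x == '(' && y == ')') || (x == '[' && y == ']') || (x == '{' && y == '}')

-- _drop_pairs: one pass deleting disjoint adjacent matched pairs
def pvDrop : List Char → List Char
  | x :: y :: rest => if pvPair x y then pvDrop rest else x :: pvDrop (y :: rest)
  | l => l
termination_by l => l.length

-- termination fact for pvReduce (cited by its decreasing_by)
theorem pvDrop_len_le (b : List Char) : (pvDrop b).length ≤ b.length := by
  induction b using pvDrop.induct with
  | case1 x y rest h ih =>
    rw [pvDrop, if_pos h]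
    simp only [List.length_cons]
    omega
  | case2 x y rest h ih =>
    rw [pvDrop, if_neg h]
    simp only [List.length_cons] at ih ⊢
    omega
  | case3 l h => cases l with
    | nil => simp [pvDrop]
    | cons a t => cases t with
      | nil => simp [pvDrop]
      | cons b r => exact absurd rfl (h a b r)

-- B's while loop: reduce to fixpoint, valid iff it reaches []
def pvReduce : List Char → Bool
  | [] => true
  | x :: xs =>
    if (pvDrop (x :: xs)).length = (x :: xs).length then false
    else pvReduce (pvDrop (x :: xs))
termination_by b => b.length
decreasing_by
  have := pvDrop_len_le (x :: xs)
  simp only [List.length_cons] at *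
  omega

-- B's for-loop: per character, reject invalid chars, collect brackets
def pvFilterB : List Char → Option (List Char)
  | [] => some []
  | c :: rest =>
    if ¬ pvValidChars.contains c then none
    else if pvIsBracket c then (pvFilterB rest).map (c :: ·)
    else pvFilterB rest

def validate_smiles_basic_py_alt (smiles : String) : Bool :=
  if smiles.toList = [] then false
  else
    let cs := PySem.Chars.strip smiles.toList
    if cs.length < 2 then false
    else
      match pvFilterB cs with
      | none => false
      | some b => pvReduce b

-- ===== PRECONDITION & SPEC =====
def Spec_validate_smiles_basic_py (smiles : String) (out : Bool) : Prop := out = validate_smiles_basic_py_alt smiles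
instance (smiles : String) (out : Bool) : Decidable (Spec_validate_smiles_basic_py smiles out) := by unfold Spec_validate_smiles_basic_py; infer_instance

-- ===== CLAIM (what is proved, stated in full; the proofs are below) =====
def Claim_equal_validate_smiles_basic_py : Prop := ∀ (smiles : String), Dom_validate_smiles_basic_py smiles → Spec_validate_smiles_basic_py smiles (validate_smiles_basic_py smiles)

-- ===== LEMMAS AND PROOFS =====

theorem pvIsBracket_eq (c : Char) : pvIsBracket c = (pvIsOpener c || pvIsCloser c) := by
  simp only [pvIsBracket, pvIsOpener, pvIsCloser]
  cases c == '(' <;> cases c == ')' <;> cases c == '[' <;> cases c == ']' <;>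
    cases c == '{' <;> cases c == '}' <;> rfl

-- B's filter loop = (all chars valid) guard + bracket filter
theorem pvFilterB_eq (cs : List Char) :
    pvFilterB cs = if cs.all (fun c => pvValidChars.contains c) then some (cs.filter pvIsBracket) else none := by
  induction cs with
  | nil => simp [pvFilterB]
  | cons c rest ih =>
    by_cases hv : c ∈ pvValidChars
    · by_cases hb : pvIsBracket c <;>
        by_cases ha : ∀ x ∈ rest, x ∈ pvValidChars <;>
          simp [pvFilterB, hv, hb, ha, ih]
    · simp [pvFilterB, hv]

-- Bool facts about the character classes
theorem pvNotBracket_opener {c : Char} (h : pvIsBracket c = false) : pvIsOpener c = false := by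
  have e := pvIsBracket_eq c
  rw [h] at e
  exact (Bool.or_eq_false_iff.mp e.symm).1

theorem pvNotBracket_closer {c : Char} (h : pvIsBracket c = false) : pvIsCloser c = false := by
  have e := pvIsBracket_eq c
  rw [h] at e
  exact (Bool.or_eq_false_iff.mp e.symm).2

theorem pvBracket_closer {c : Char} (h : pvIsBracket c = true) (ho : pvIsOpener c = false) :
    pvIsCloser c = true := by
  have e := pvIsBracket_eq c
  rw [h, ho] at e
  simpa using e.symm

-- A's loop ignores non-bracket characters
theorem pvLoopA_filter (cs : List Char) : ∀ st, pvLoopA st cs = pvLoopA st (cs.filter pvIsBracket) := by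
  induction cs with
  | nil => intro st; rfl
  | cons c rest ih =>
    intro st
    cases hb : pvIsBracket c
    · have ho := pvNotBracket_opener hb
      have hc := pvNotBracket_closer hb
      simp [pvLoopA, hb, ho, hc, ih]
    · cases ho : pvIsOpener c
      · have hc := pvBracket_closer hb ho
        cases st with
        | nil => simp [pvLoopA, hb, ho, hc]
        | cons t ts =>
          by_cases ht : t = c
          · simp [pvLoopA, hb, ho, hc, ht, ih]
          · simp [pvLoopA, hb, ho, hc, ht]
      · simp [pvLoopA, hb, ho, ih]

-- processing an adjacent matched pair is a no-op for A's loop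
theorem pvLoopA_pair {x y : Char} (h : pvPair x y = true) (l : List Char) (st : List Char) :
    pvLoopA st (x :: y :: l) = pvLoopA st l := by
  simp only [pvPair, Bool.or_eq_true, Bool.and_eq_true, beq_iff_eq] at h
  rcases h with (⟨hx, hy⟩ | ⟨hx, hy⟩) | ⟨hx, hy⟩
  · subst hx; subst hy; simp [pvLoopA, pvIsOpener, pvIsCloser, pvCloserOf]
  · subst hx; subst hy; simp [pvLoopA, pvIsOpener, pvIsCloser, pvCloserOf]
  · subst hx; subst hy; simp [pvLoopA, pvIsOpener, pvIsCloser, pvCloserOf]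

-- one head step of A's loop is uniform in the tail
theorem pvLoopA_cons_congr (x : Char) {l1 l2 : List Char}
    (h : ∀ st, pvLoopA st l1 = pvLoopA st l2) : ∀ st, pvLoopA st (x :: l1) = pvLoopA st (x :: l2) := by
  intro st
  by_cases ho : pvIsOpener x
  · simp [pvLoopA, ho, h]
  · by_cases hc : pvIsCloser x
    · cases st with
      | nil => simp [pvLoopA, ho, hc]
      | cons t ts => by_cases ht : t = x <;> simp [pvLoopA, ho, hc, ht, h]
    · simp [pvLoopA, ho, hc, h]

-- a pair-elimination pass preserves A's loop verdict
theorem pvLoopA_drop (b : List Char) : ∀ st, pvLoopA st (pvDrop b) = pvLoopA st b := by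
  induction b using pvDrop.induct with
  | case1 x y rest h ih =>
    intro st
    rw [pvDrop, if_pos h, ih st, pvLoopA_pair h]
  | case2 x y rest h ih =>
    intro st
    rw [pvDrop, if_neg h]
    exact pvLoopA_cons_congr x ih st
  | case3 l h => intro st; cases l with
    | nil => simp [pvDrop]
    | cons a t => cases t with
      | nil => simp [pvDrop]
      | cons b r => exact absurd rfl (h a b r)

-- adjacent matched pair somewhere in the list
def pvHasPair : List Char → Bool
  | x :: y :: rest => pvPair x y || pvHasPair (y :: rest)
  | _ => false

theorem pvHasPair_cons (x : Char) {l : List Char} (h : pvHasPair l = true) : pvHasPair (x :: l) = true := by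
  cases l with
  | nil => simp [pvHasPair] at h
  | cons y r => simp [pvHasPair, h]

-- if a matched pair is adjacent, the pass strictly shrinks
theorem pvDrop_len_lt {b : List Char} (h : pvHasPair b = true) : (pvDrop b).length < b.length := by
  induction b using pvDrop.induct with
  | case1 x y rest hp ih =>
    have := pvDrop_len_le rest
    simp [pvDrop, hp]; omega
  | case2 x y rest hp ih =>
    simp only [pvHasPair, hp, Bool.false_or] at h
    have := ih h
    rw [pvDrop, if_neg hp]
    simp only [List.length_cons] at this ⊢
    omega
  | case3 l hl => cases l with
    | nil => simp [pvHasPair] at h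
    | cons a t => cases t with
      | nil => simp [pvHasPair] at h
      | cons b r => exact absurd rfl (hl a b r)

theorem pvOpener_pair (c : Char) (ho : pvIsOpener c = true) : pvPair c (pvCloserOf c) = true := by
  simp [pvIsOpener] at ho
  rcases ho with (h | h) | h <;> subst h <;> rfl

theorem pvCloser_not_opener (c : Char) (hc : pvIsCloser c = true) : pvIsOpener c = false := by
  simp [pvIsCloser] at hc
  rcases hc with (h | h) | h <;> subst h <;> rfl

-- an accepted bracket-only string has an adjacent matched pair, or is all closers
theorem pvLoopA_accept_pair (b : List Char) : ∀ st, b.all pvIsBracket = true → pvLoopA st b = true →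
    (pvHasPair b || b.all pvIsCloser) = true := by
  induction b with
  | nil => intro st _ _; simp
  | cons c rest ih =>
    intro st hall hacc
    rw [List.all_cons, Bool.and_eq_true] at hall
    obtain ⟨hb, hrest⟩ := hall
    by_cases ho : pvIsOpener c
    · simp only [pvLoopA, ho, if_true] at hacc
      have := ih (pvCloserOf c :: st) hrest hacc
      rcases Bool.or_eq_true_iff.mp this with hp | hcl
      · simp [pvHasPair_cons c hp]
      · -- rest is all closers; it must start with pvCloserOf c
        cases rest with
        | nil => simp [pvLoopA, List.isEmpty] at hacc
        | cons d r =>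
          rw [List.all_cons, Bool.and_eq_true] at hcl
          obtain ⟨hd, _⟩ := hcl
          by_cases hm : pvCloserOf c = d
          · have hp : pvPair c d = true := by rw [← hm]; exact pvOpener_pair c ho
            simp [pvHasPair, hp]
          · simp [pvLoopA, pvCloser_not_opener d hd, hd, hm] at hacc
    · have hc : pvIsCloser c = true := pvBracket_closer hb (Bool.eq_false_iff.mpr ho)
      cases st with
      | nil => simp [pvLoopA, ho, hc] at hacc
      | cons t ts =>
        simp [pvLoopA, ho, hc] at hacc
        obtain ⟨ht, hacc⟩ := hacc
        subst ht
        have := ih ts hrest hacc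
        rcases Bool.or_eq_true_iff.mp this with hp | hcl
        · simp [pvHasPair_cons t hp]
        · simp [List.all_cons, hc, hcl]

-- a nonempty all-closer string is rejected from the empty stack
theorem pvAllClosers_reject (c : Char) (rest : List Char) (hc : pvIsCloser c = true) :
    pvLoopA [] (c :: rest) = false := by
  simp [pvLoopA, pvCloser_not_opener c hc, hc]

theorem pvDrop_brackets {b : List Char} (h : b.all pvIsBracket = true) : (pvDrop b).all pvIsBracket = true := by
  induction b using pvDrop.induct with
  | case1 x y rest hp ih =>
    rw [List.all_cons, List.all_cons, Bool.and_eq_true, Bool.and_eq_true] at h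
    rw [pvDrop, if_pos hp]
    exact ih h.2.2
  | case2 x y rest hp ih =>
    rw [List.all_cons, List.all_cons, Bool.and_eq_true, Bool.and_eq_true] at h
    rw [pvDrop, if_neg hp, List.all_cons, Bool.and_eq_true]
    exact ⟨h.1, ih (by rw [List.all_cons, Bool.and_eq_true]; exact ⟨h.2.1, h.2.2⟩)⟩
  | case3 l hl => cases l with
    | nil => simp [pvDrop]
    | cons a t => cases t with
      | nil => simpa [pvDrop] using h
      | cons b r => exact absurd rfl (hl a b r)

-- main: on bracket-only input, B's reduction loop equals A's stack loop
theorem pvReduce_eq (n : Nat) : ∀ b : List Char, b.length ≤ n → b.all pvIsBracket = true →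
    pvReduce b = pvLoopA [] b := by
  induction n with
  | zero =>
    intro b hlen _
    have : b = [] := List.eq_nil_of_length_eq_zero (Nat.le_zero.mp hlen)
    subst this; simp [pvReduce, pvLoopA]
  | succ n ih =>
    intro b hlen hall
    cases b with
    | nil => simp [pvReduce, pvLoopA]
    | cons x xs =>
      rw [pvReduce]
      by_cases h : (pvDrop (x :: xs)).length = (x :: xs).length
      · rw [if_pos h]
        -- no pair can be adjacent, so acceptance is impossible
        cases hacc : pvLoopA [] (x :: xs) with
        | false => rfl
        | true =>
          have := pvLoopA_accept_pair (x :: xs) [] hall hacc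
          rcases Bool.or_eq_true_iff.mp this with hp | hcl
          · exact absurd h (Nat.ne_of_lt (pvDrop_len_lt hp))
          · simp [List.all_cons] at hcl
            rw [pvAllClosers_reject x xs hcl.1] at hacc
            exact hacc.symm ▸ rfl
      · rw [if_neg h]
        have hlt : (pvDrop (x :: xs)).length < (x :: xs).length :=
          lt_of_le_of_ne (pvDrop_len_le _) h
        rw [ih (pvDrop (x :: xs))
            (by have := hlt; simp only [List.length_cons] at this hlen ⊢; omega)
            (pvDrop_brackets hall)]
        exact pvLoopA_drop (x :: xs) []

-- ===== VERDICT (by name: the statement is the Claim_ definition above) =====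
theorem validate_smiles_basic_py_spec : Claim_equal_validate_smiles_basic_py := by
  intro smiles _
  unfold Spec_validate_smiles_basic_py validate_smiles_basic_py validate_smiles_basic_py_alt
  by_cases h0 : smiles.toList = []
  · simp [h0]
  · simp only [h0, ite_false]
    set cs := PySem.Chars.strip smiles.toList with hcs
    by_cases h2 : cs.length < 2
    · simp [h2]
    · simp only [h2, ite_false, pvFilterB_eq]
      cases hall : cs.all (fun c => pvValidChars.contains c)
      · simp
      · simp only [if_true]
        rw [pvReduce_eq (cs.filter pvIsBracket).length _ le_rfl
            (by simp), ← pvLoopA_filter]
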